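-- pv_equiv track=rewrite | github.com/dmoliveira/my_opencode | scripts/hygiene_drift_check.py | _duplicate_template_audit
-- ===== SOURCE A (Python) =====
-- ALLOWED_DUPLICATE_CLUSTERS = {
--     frozenset({"complete", "ac"}),
--     frozenset({"model-routing", "model-profile"}),
--     frozenset({"model-routing-status", "model-profile-status"}),
--     frozenset({"autopilot-go", "continue-work"}),
--     frozenset({"autoloop", "ulw-loop", "ralph-loop"}),
-- }
--
-- def _duplicate_template_audit(
--     commands: dict[str, dict[str, object]],
-- ) -> tuple[list[list[str]], list[list[str]]]:
--     clusters: dict[str, list[str]] = {}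
--     for command_name, meta in commands.items():
--         if not isinstance(meta, dict):
--             continue
--         template = str(meta.get("template", ""))
--         clusters.setdefault(template, []).append(command_name)
--
--     duplicates = [sorted(names) for names in clusters.values() if len(names) > 1]
--     duplicates.sort(key=lambda values: (len(values), values), reverse=True)
--
--     unexpected: list[list[str]] = []
--     for cluster in duplicates:
--         if frozenset(cluster) not in ALLOWED_DUPLICATE_CLUSTERS:
--             unexpected.append(cluster)
--     return duplicates, unexpected
-- ===== SOURCE B (Python) =====
-- ALLOWED_DUPLICATE_CLUSTERS = {
--     frozenset({"complete", "ac"}),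
--     frozenset({"model-routing", "model-profile"}),
--     frozenset({"model-routing-status", "model-profile-status"}),
--     frozenset({"autopilot-go", "continue-work"}),
--     frozenset({"autoloop", "ulw-loop", "ralph-loop"}),
-- }
--
--
-- def _duplicate_template_audit(commands):
--     pairs = [
--         (name, str(meta.get("template", "")))
--         for name, meta in commands.items()
--         if isinstance(meta, dict)
--     ]
--     seen = set()
--     groups = []
--     for _, tpl in pairs:
--         if tpl not in seen:
--             seen.add(tpl)
--             group = sorted(n for n, t in pairs if t == tpl)
--             if len(group) > 1:
--                 groups.append(group)
--     duplicates = sorted(groups, key=lambda v: (len(v), v), reverse=True)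
--     unexpected = [c for c in duplicates if frozenset(c) not in ALLOWED_DUPLICATE_CLUSTERS]
--     return duplicates, unexpected
-- ===== Notes on version B (the rewrite author's own statement) =====
-- stated objective: alternative
-- what changed: B drops A's dict-of-lists accumulator: it builds (name, template) pairs once, then a single seen-set scan emits each template's sorted name group at its first occurrence (collecting members by filtering the pair list), followed by the same (len, values) reverse sort and an allowed-cluster filter comprehension.
import Mathlib
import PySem

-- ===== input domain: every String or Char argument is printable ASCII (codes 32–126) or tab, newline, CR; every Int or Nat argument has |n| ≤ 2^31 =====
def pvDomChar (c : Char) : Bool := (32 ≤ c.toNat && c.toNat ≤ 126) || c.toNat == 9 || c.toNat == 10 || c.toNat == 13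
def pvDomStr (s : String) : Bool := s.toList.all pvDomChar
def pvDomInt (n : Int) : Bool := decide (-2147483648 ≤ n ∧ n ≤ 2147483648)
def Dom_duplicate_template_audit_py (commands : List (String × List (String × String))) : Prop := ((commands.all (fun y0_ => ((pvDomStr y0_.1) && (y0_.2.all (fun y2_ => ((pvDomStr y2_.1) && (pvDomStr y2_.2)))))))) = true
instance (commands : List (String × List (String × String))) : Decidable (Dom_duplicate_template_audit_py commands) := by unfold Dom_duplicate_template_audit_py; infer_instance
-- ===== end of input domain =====

-- B replaces A's dict-of-lists grouping by a seen-set scan over (name, template)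
-- pairs that emits each template's sorted name group at its first occurrence
-- (objective: alternative decomposition, no dict of accumulating lists; same cost class).

-- ===== PORT A =====
-- commands.items(): the dict the association list denotes, in insertion order (duplicate keys overwrite, keeping position)
def pvItems (commands : List (String × List (String × String))) : List (String × List (String × String)) :=
  (PySem.Dict.ofList commands).items

-- str(meta.get("template", "")) — meta's values are strings here, so str() is the identity
def pvTpl (m : List (String × String)) : String :=
  (PySem.Dict.ofList m).getD "template" ""

-- ALLOWED_DUPLICATE_CLUSTERS (a set of frozensets)
def pvAllowed : List (PySem.Set String) :=
  [PySem.Set.ofList ["complete", "ac"],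
   PySem.Set.ofList ["model-routing", "model-profile"],
   PySem.Set.ofList ["model-routing-status", "model-profile-status"],
   PySem.Set.ofList ["autopilot-go", "continue-work"],
   PySem.Set.ofList ["autoloop", "ulw-loop", "ralph-loop"]]

-- frozenset(cluster) in ALLOWED_DUPLICATE_CLUSTERS (frozenset equality = equality as finite sets)
def pvInAllowed (cluster : List String) : Bool :=
  pvAllowed.any (fun s => PySem.Set.equal s (PySem.Set.ofList cluster))

-- the 'isinstance(meta, dict)' guard is always true under the declared type and is omitted
def duplicate_template_audit_py (commands : List (String × List (String × String))) : List (List String) × List (List String) :=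
  let clusters : PySem.Dict String (List String) :=
    (pvItems commands).foldl
      (fun d p => d.modify (pvTpl p.2) [] (fun v => v ++ [p.1])) PySem.Dict.empty
  let duplicates0 :=
    (clusters.values.filter (fun names => decide (1 < names.length))).map
      (fun names => PySem.List.sorted names (fun x => x) false)
  let duplicates := PySem.List.sorted2 duplicates0 (fun v => v.length) (fun v => v) true
  let unexpected := duplicates.foldl
      (fun acc c => if pvInAllowed c then acc else acc ++ [c]) []
  (duplicates, unexpected)

-- ===== PORT B =====
def duplicate_template_audit_py_alt (commands : List (String × List (String × String))) : List (List String) × List (List String) :=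
  let pairs := (pvItems commands).map (fun p => (p.1, pvTpl p.2))
  let st := pairs.foldl
    (fun (st : PySem.Set String × List (List String)) q =>
      if PySem.Set.contains st.1 q.2 then st
      else
        let group := PySem.List.sorted ((pairs.filter (fun r => r.2 == q.2)).map (fun r => r.1)) (fun x => x) false
        (PySem.Set.add st.1 q.2, if decide (1 < group.length) then st.2 ++ [group] else st.2))
    (PySem.Set.empty, [])
  let duplicates := PySem.List.sorted2 st.2 (fun v => v.length) (fun v => v) true
  let unexpected := duplicates.filter (fun c => !(pvInAllowed c))
  (duplicates, unexpected)

-- ===== PRECONDITION & SPEC =====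
def Spec_duplicate_template_audit_py (commands : List (String × List (String × String))) (out : List (List String) × List (List String)) : Prop := out = duplicate_template_audit_py_alt commands
instance (commands : List (String × List (String × String))) (out : List (List String) × List (List String)) : Decidable (Spec_duplicate_template_audit_py commands out) := by unfold Spec_duplicate_template_audit_py; infer_instance

-- ===== CLAIM (what is proved, stated in full; the proofs are below) =====
def Claim_equal_duplicate_template_audit_py : Prop := ∀ (commands : List (String × List (String × String))), Dom_duplicate_template_audit_py commands → Spec_duplicate_template_audit_py commands (duplicate_template_audit_py commands)

-- ===== LEMMAS AND PROOFS =====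

-- updating a set appends exactly the new elements, deduplicated, in first-occurrence order
theorem pv_set_update_eq {α : Type} [BEq α] [LawfulBEq α] (xs : List α) (s : PySem.Set α) :
    PySem.Set.update s xs = s ++ (PySem.Set.ofList xs).filter (fun x => !(PySem.Set.contains s x)) := by
  induction xs generalizing s with
  | nil => simp [PySem.Set.update, PySem.Set.ofList]
  | cons t xs ih =>
    have hof : PySem.Set.ofList (t :: xs) = PySem.Set.update [t] xs := by
      simp [PySem.Set.ofList, PySem.Set.update, List.foldl_cons, PySem.Set.add, PySem.Set.contains]
    have hupd : PySem.Set.update s (t :: xs) = PySem.Set.update (PySem.Set.add s t) xs := by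
      simp [PySem.Set.update, List.foldl_cons]
    rw [hupd, ih, hof, ih]
    by_cases h : t ∈ s
    · have hadd : PySem.Set.add s t = s := by simp [PySem.Set.add, PySem.Set.contains, h]
      rw [hadd]
      simp only [List.filter_append]
      congr 1
      have ht : (!PySem.Set.contains s t) = false := by simp [PySem.Set.contains, h]
      simp only [List.filter_cons, ht, Bool.false_eq_true, List.filter_filter]
      apply List.filter_congr
      intro x _
      by_cases hx : x = t
      · subst hx; simp [PySem.Set.contains, h]
      · simp [hx]
    · have hadd : PySem.Set.add s t = s ++ [t] := by simp [PySem.Set.add, PySem.Set.contains, h]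
      rw [hadd]
      simp only [List.filter_append, List.append_assoc]
      congr 1
      have ht : (!PySem.Set.contains s t) = true := by simp [PySem.Set.contains, h]
      simp only [List.filter_cons, ht, if_pos, List.filter_filter, List.filter_nil]
      congr 1
      apply List.filter_congr
      intro x _
      by_cases hx : x = t
      · subst hx; simp [PySem.Set.contains]
      · simp [PySem.Set.contains, hx]

theorem pv_ofList_cons {α : Type} [BEq α] [LawfulBEq α] (t : α) (xs : List α) :
    PySem.Set.ofList (t :: xs) = t :: (PySem.Set.ofList xs).filter (fun x => !(x == t)) := by
  have hof : PySem.Set.ofList (t :: xs) = PySem.Set.update [t] xs := by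
    simp [PySem.Set.ofList, PySem.Set.update, List.foldl_cons, PySem.Set.add, PySem.Set.contains]
  rw [hof, pv_set_update_eq]
  simp only [List.cons_append, List.nil_append, List.cons.injEq, true_and]
  apply List.filter_congr
  intro x _
  simp [PySem.Set.contains, eq_comm]

-- the seen-set loop of B, characterised
theorem pv_seen_fold {β : Type} (g : String → List β) :
    ∀ (xs : List String) (s : PySem.Set String) (acc : List β),
    xs.foldl (fun st t => if PySem.Set.contains st.1 t then st else (PySem.Set.add st.1 t, st.2 ++ g t)) (s, acc)
      = (PySem.Set.update s xs,
         acc ++ ((PySem.Set.ofList xs).filter (fun t => !(PySem.Set.contains s t))).flatMap g) := by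
  intro xs
  induction xs with
  | nil => intro s acc; simp [PySem.Set.update, PySem.Set.ofList]
  | cons t xs ih =>
    intro s acc
    rw [List.foldl_cons, pv_ofList_cons]
    have hupd : PySem.Set.update s (t :: xs) = PySem.Set.update (PySem.Set.add s t) xs := by
      simp [PySem.Set.update, List.foldl_cons]
    by_cases h : t ∈ s
    · have hc : PySem.Set.contains s t = true := by simp [PySem.Set.contains, h]
      have hadd : PySem.Set.add s t = s := by simp [PySem.Set.add, PySem.Set.contains, h]
      simp only [hc, if_pos]
      rw [ih s acc, hupd, hadd]
      congr 2
      simp only [List.filter_cons]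
      have ht : (!PySem.Set.contains s t) = false := by simp [PySem.Set.contains, h]
      simp only [ht, Bool.false_eq_true, List.filter_filter]
      congr 1
      apply List.filter_congr
      intro x _
      by_cases hx : x = t
      · subst hx; simp [PySem.Set.contains, h]
      · simp [hx]
    · have hc : PySem.Set.contains s t = false := by simp [PySem.Set.contains, h]
      have hadd : PySem.Set.add s t = s ++ [t] := by simp [PySem.Set.add, PySem.Set.contains, h]
      simp only [hc, Bool.false_eq_true, if_false]
      rw [ih (PySem.Set.add s t) (acc ++ g t), hupd]
      congr 1
      simp only [List.filter_cons]
      have ht : (!PySem.Set.contains s t) = true := by simp [PySem.Set.contains, h]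
      simp only [ht, if_pos, List.flatMap_cons, List.append_assoc, List.filter_filter]
      congr 2
      apply congrArg
      apply List.filter_congr
      intro x _
      by_cases hx : x = t
      · subst hx; simp [PySem.Set.contains, hadd]
      · simp [hx, hadd, PySem.Set.contains]

theorem pv_flatMap_ite {α β : Type} (L : List α) (p : α → Bool) (h : α → List β) :
    L.flatMap (fun t => if p t then [h t] else []) = (L.filter p).map h := by
  induction L with
  | nil => simp
  | cons x L ih =>
    by_cases hx : p x
    · simp [hx, ih]
    · simp [hx, ih]

theorem pv_groups_eq (l : List (String × List (String × String))) :
    ((l.foldl (fun d p => PySem.Dict.modify d (pvTpl p.2) [] (fun v => v ++ [p.1])) PySem.Dict.empty).values.filter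
        (fun names => decide (1 < names.length))).map (fun names => PySem.List.sorted names (fun x => x) false)
      = ((l.map (fun p => (p.1, pvTpl p.2))).foldl
          (fun (st : PySem.Set String × List (List String)) q =>
            if PySem.Set.contains st.1 q.2 then st
            else
              ((PySem.Set.add st.1 q.2),
               if decide (1 < (PySem.List.sorted (((l.map (fun p => (p.1, pvTpl p.2))).filter (fun r => r.2 == q.2)).map (fun r => r.1)) (fun x => x) false).length)
               then st.2 ++ [PySem.List.sorted (((l.map (fun p => (p.1, pvTpl p.2))).filter (fun r => r.2 == q.2)).map (fun r => r.1)) (fun x => x) false]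
               else st.2))
          (PySem.Set.empty, [])).2 := by
  set key : (String × List (String × String)) → String := fun p => pvTpl p.2 with hkey
  set nm : String → List String := fun t => (l.filter (fun p => key p == t)).map (fun p => p.1) with hnm
  set srt : String → List String := fun t => PySem.List.sorted (nm t) (fun x => x) false with hsrt
  set G : String → List (List String) := fun t => if decide (1 < (srt t).length) then [srt t] else [] with hG
  set d := l.foldl (fun d p => PySem.Dict.modify d (key p) [] (fun v => v ++ [p.1])) PySem.Dict.empty with hd
  have hkeys : d.keys = PySem.Set.ofList (l.map key) := by
    rw [hd, PySem.Dict.keys_foldl_modify_key l key [] (fun _ p => fun v => v ++ [p.1])]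
    rfl
  have hnd : d.keys.Nodup := by
    rw [hd]
    exact PySem.Dict.nodup_keys_foldl_modify_key l key [] _ _ (by simp)
  have hvals : d.values = d.keys.map (fun k => d.getD k []) :=
    PySem.Dict.values_eq_map_keys d hnd []
  have hgetD : (fun k => d.getD k []) = nm := by
    funext k
    have hfm : (l.map (fun p => (key p, p.1))).foldl
        (fun d q => PySem.Dict.modify d q.1 [] (fun v => v ++ [q.2])) PySem.Dict.empty = d := by
      rw [hd, List.foldl_map]
    rw [← hfm, PySem.Dict.getD_foldl_modify_append, PySem.Dict.getD_empty]
    simp [hnm, List.filter_map, List.map_map, Function.comp_def]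
  have hmap2 : (l.map (fun p => (p.1, pvTpl p.2))).map (fun q => q.2) = l.map key := by
    simp [List.map_map, Function.comp_def, hkey]
  have hnmB : ∀ t, ((l.map (fun p => (p.1, pvTpl p.2))).filter (fun r => r.2 == t)).map (fun r => r.1) = nm t := by
    intro t
    simp [List.filter_map, List.map_map, Function.comp_def, hnm, hkey]
  have hbody : (fun (st : PySem.Set String × List (List String)) (q : String × String) =>
            if PySem.Set.contains st.1 q.2 then st
            else
              ((PySem.Set.add st.1 q.2),
               if decide (1 < (PySem.List.sorted (((l.map (fun p => (p.1, pvTpl p.2))).filter (fun r => r.2 == q.2)).map (fun r => r.1)) (fun x => x) false).length)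
               then st.2 ++ [PySem.List.sorted (((l.map (fun p => (p.1, pvTpl p.2))).filter (fun r => r.2 == q.2)).map (fun r => r.1)) (fun x => x) false]
               else st.2))
      = (fun st q => if PySem.Set.contains st.1 q.2 then st
          else (PySem.Set.add st.1 q.2, st.2 ++ G q.2)) := by
    funext st q
    rw [hnmB q.2]
    by_cases hc : q.2 ∈ st.1
    · simp [PySem.Set.contains, hc]
    · by_cases hlen : 1 < (nm q.2).length
      · simp [PySem.Set.contains, hc, hG, hsrt, hlen, PySem.List.length_sorted]
      · simp [PySem.Set.contains, hc, hG, hsrt, hlen, PySem.List.length_sorted]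
  rw [hbody]
  rw [← List.foldl_map (f := fun q : String × String => q.2)
        (g := fun st t => if PySem.Set.contains st.1 t then st
          else (PySem.Set.add st.1 t, st.2 ++ G t))]
  rw [pv_seen_fold G]
  rw [hmap2]
  have hfilt : (PySem.Set.ofList (l.map key)).filter (fun t => !(PySem.Set.contains PySem.Set.empty t))
      = PySem.Set.ofList (l.map key) := by
    simp [PySem.Set.contains, PySem.Set.empty]
  simp only [hfilt, List.nil_append]
  rw [pv_flatMap_ite]
  rw [hvals, hgetD, hkeys, List.filter_map, List.map_map]
  have hpred : ∀ t ∈ PySem.Set.ofList (l.map key),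
      ((fun names => decide (1 < names.length)) ∘ nm) t
        = (fun t => decide (1 < (srt t).length)) t := by
    intro t _
    simp [hsrt, PySem.List.length_sorted]
  rw [List.filter_congr hpred]
  rfl

-- ===== VERDICT (by name: the statement is the Claim_ definition above) =====
-- A's 'if cluster is allowed skip else append' loop is a filter
theorem pv_unexpected_filter (L : List (List String)) :
    L.foldl (fun acc c => if pvInAllowed c then acc else acc ++ [c]) []
      = L.filter (fun c => !(pvInAllowed c)) := by
  have hb : (fun (acc : List (List String)) c => if pvInAllowed c then acc else acc ++ [c])
      = (fun acc c => if (!(pvInAllowed c)) then acc ++ [c] else acc) := by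
    funext acc c
    by_cases h : pvInAllowed c <;> simp [h]
  rw [hb, PySem.List.foldl_append_if_eq_filter]
  simp

theorem duplicate_template_audit_py_spec : Claim_equal_duplicate_template_audit_py := by
  intro commands _
  unfold Spec_duplicate_template_audit_py
  simp only [duplicate_template_audit_py, duplicate_template_audit_py_alt]
  rw [pv_groups_eq (pvItems commands), pv_unexpected_filter]
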